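-- pv_equiv track=rewrite | github.com/CristhianBS3008/Cuadrados-M-gicos---Algoritmo-Gen-tico | genetic.py | cruce
-- ===== SOURCE A (Python) =====
-- def cruce(vectorPuntos, individuo1, individuo2):
--     individuo1Final = list(individuo1)
--     individuo2Final = list(individuo2)
--     for i in range(len(vectorPuntos)):              #i = 0 1 2 3 4 . . . .
--         if i%2 == 1:                                # --> 1 3 . . . .     -->> mismo efecto anterior, escojo solo parejas de puntos
--             for j in range(vectorPuntos[i-1],vectorPuntos[i]+1):    # +1 en caso se repitan los mismo pts para el crossover
--                 individuo1Final[j] = individuo2[j]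
--                 individuo2Final[j] = individuo1[j]
--
--     return individuo1Final,individuo2Final
-- ===== SOURCE B (Python) =====
-- def cruce(vectorPuntos, individuo1, individuo2):
--     # Build the set of positions to swap, then do one flat swapped-copy pass per individual.
--     swap = set()
--     it = iter(vectorPuntos)
--     for a, b in zip(it, it):                 # consecutive (start, end) pairs; a trailing odd point is ignored
--         swap.update(range(a, b + 1))
--     individuo1Final = [individuo2[j] if j in swap else x for j, x in enumerate(individuo1)]
--     individuo2Final = [individuo1[j] if j in swap else x for j, x in enumerate(individuo2)]
--     return individuo1Final, individuo2Final
-- ===== Notes on version B (the rewrite author's own statement) =====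
-- stated objective: alternative
-- what changed: Replaces A's index-parity outer loop with nested in-place segment writes by building a set of swap positions from consecutive point pairs and producing each output list in one flat enumerate pass over the individuals.
-- outside the precondition, e.g. on cruce([-1, -1], [5], [7]): A returns ([7], [5]), B returns ([5], [7])
import Mathlib
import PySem

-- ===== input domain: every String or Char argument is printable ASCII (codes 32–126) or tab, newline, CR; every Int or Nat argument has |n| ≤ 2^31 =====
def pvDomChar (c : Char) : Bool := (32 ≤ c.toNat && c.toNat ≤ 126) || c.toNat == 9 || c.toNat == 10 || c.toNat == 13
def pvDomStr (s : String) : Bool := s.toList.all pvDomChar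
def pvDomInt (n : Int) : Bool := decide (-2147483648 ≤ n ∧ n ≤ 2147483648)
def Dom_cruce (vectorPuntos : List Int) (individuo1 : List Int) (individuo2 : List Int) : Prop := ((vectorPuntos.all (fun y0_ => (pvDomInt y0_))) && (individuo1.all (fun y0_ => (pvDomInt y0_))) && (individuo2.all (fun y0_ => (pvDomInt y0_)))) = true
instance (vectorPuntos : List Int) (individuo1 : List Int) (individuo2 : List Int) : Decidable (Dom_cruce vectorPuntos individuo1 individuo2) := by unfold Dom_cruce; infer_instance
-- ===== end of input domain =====

-- B replaces A's index-parity outer loop with nested in-place segment writes by a swap-position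
-- set built from consecutive point pairs followed by one flat enumerate pass per individual
-- (alternative decomposition, same cost).

-- ===== PORT A =====
-- literal transliteration of A: copy both individuals, loop i over range(len(vectorPuntos)),
-- on odd i write the segment range(vP[i-1], vP[i]+1) of each copy from the OTHER original.
def cruce (vectorPuntos : List Int) (individuo1 : List Int) (individuo2 : List Int) : List Int × List Int :=
  (PySem.List.pyRange 0 (PySem.List.len vectorPuntos) 1).foldl
    (fun st i =>
      if PySem.Int.mod i 2 == 1 then
        (PySem.List.pyRange (PySem.List.pyGetD vectorPuntos (i - 1) 0)
            (PySem.List.pyGetD vectorPuntos i 0 + 1) 1).foldl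
          (fun st2 j =>
            (PySem.List.pySetD st2.1 j (PySem.List.pyGetD individuo2 j 0),
             PySem.List.pySetD st2.2 j (PySem.List.pyGetD individuo1 j 0)))
          st
      else st)
    (individuo1, individuo2)

-- ===== PORT B =====
-- zip(it, it) over one iterator: consecutive (start, end) pairs, a trailing odd point is dropped.
def pairsOf : List Int → List (Int × Int)
  | a :: b :: t => (a, b) :: pairsOf t
  | _ => []

-- swap = set(); for a, b in zip(it, it): swap.update(range(a, b + 1))
def swapSet (vectorPuntos : List Int) : PySem.Set Int :=
  (pairsOf vectorPuntos).foldl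
    (fun s p => PySem.Set.update s (PySem.List.pyRange p.1 (p.2 + 1) 1)) PySem.Set.empty

def cruce_alt (vectorPuntos : List Int) (individuo1 : List Int) (individuo2 : List Int) : List Int × List Int :=
  let s := swapSet vectorPuntos
  ((PySem.List.enumerate individuo1 0).map
      (fun q => if PySem.Set.contains s q.1 then PySem.List.pyGetD individuo2 q.1 0 else q.2),
   (PySem.List.enumerate individuo2 0).map
      (fun q => if PySem.Set.contains s q.1 then PySem.List.pyGetD individuo1 q.1 0 else q.2))

-- ===== PRECONDITION & SPEC =====
-- Pre_ restricts to the natural crossover domain: every non-empty segment (a, b) lies inside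
-- both individuals (0 ≤ a and b < len).  Outside it A either raises IndexError or silently
-- wraps negative indices Python-style; B leaves positions outside the lists unswapped.
def Pre_cruce (vectorPuntos : List Int) (individuo1 : List Int) (individuo2 : List Int) : Prop :=
  ∀ k ∈ List.range (vectorPuntos.length / 2),
    vectorPuntos.getD (2 * k) 0 ≤ vectorPuntos.getD (2 * k + 1) 0 →
      0 ≤ vectorPuntos.getD (2 * k) 0 ∧
      vectorPuntos.getD (2 * k + 1) 0 < (individuo1.length : Int) ∧
      vectorPuntos.getD (2 * k + 1) 0 < (individuo2.length : Int)
instance (vectorPuntos : List Int) (individuo1 : List Int) (individuo2 : List Int) : Decidable (Pre_cruce vectorPuntos individuo1 individuo2) := by unfold Pre_cruce; infer_instance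

def pvWitness_cruce : List Int × List Int × List Int := ([1, 3], [0, 1, 2, 3, 4], [9, 8, 7, 6, 5])

def Spec_cruce (vectorPuntos : List Int) (individuo1 : List Int) (individuo2 : List Int) (out : List Int × List Int) : Prop := out = cruce_alt vectorPuntos individuo1 individuo2
instance (vectorPuntos : List Int) (individuo1 : List Int) (individuo2 : List Int) (out : List Int × List Int) : Decidable (Spec_cruce vectorPuntos individuo1 individuo2 out) := by unfold Spec_cruce; infer_instance

-- ===== CLAIM (what is proved, stated in full; the proofs are below) =====
def Claim_equal_cruce : Prop := ∀ (vectorPuntos : List Int) (individuo1 : List Int) (individuo2 : List Int), Dom_cruce vectorPuntos individuo1 individuo2 → Pre_cruce vectorPuntos individuo1 individuo2 → Spec_cruce vectorPuntos individuo1 individuo2 (cruce vectorPuntos individuo1 individuo2)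

-- ===== LEMMAS AND PROOFS =====

-- one segment write of A's inner loop (both components at once)
def segWrite (individuo1 individuo2 : List Int) (st : List Int × List Int) (p : Int × Int) : List Int × List Int :=
  (PySem.List.pyRange p.1 (p.2 + 1) 1).foldl
    (fun st2 j =>
      (PySem.List.pySetD st2.1 j (PySem.List.pyGetD individuo2 j 0),
       PySem.List.pySetD st2.2 j (PySem.List.pyGetD individuo1 j 0)))
    st

-- one segment write on a single list, source fixed
def wSeg (src : List Int) (x : List Int) (lo hi : Int) : List Int :=
  (PySem.List.pyRange lo hi 1).foldl (fun x j => PySem.List.pySetD x j (PySem.List.pyGetD src j 0)) x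

-- STAGE 1: A's parity-filtered outer loop is the fold of segWrite over consecutive pairs.
lemma outer_aux (i1 i2 : List Int) : ∀ (vP : List Int) (st : List Int × List Int),
    (PySem.List.pyRange 0 (PySem.List.len vP) 1).foldl
      (fun st i =>
        if PySem.Int.mod i 2 == 1 then
          (PySem.List.pyRange (PySem.List.pyGetD vP (i - 1) 0)
              (PySem.List.pyGetD vP i 0 + 1) 1).foldl
            (fun st2 j =>
              (PySem.List.pySetD st2.1 j (PySem.List.pyGetD i2 j 0),
               PySem.List.pySetD st2.2 j (PySem.List.pyGetD i1 j 0)))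
            st
        else st) st
      = (pairsOf vP).foldl (segWrite i1 i2) st
  | [], st => by
    simp [PySem.List.len_eq, PySem.List.pyRange_one_eq_nil, pairsOf]
  | [a], st => by
    have h1 : PySem.List.pyRange 0 (PySem.List.len [a]) 1 = [0] := by
      rw [show PySem.List.len [a] = (1 : Int) from by simp [PySem.List.len_eq]]
      decide
    rw [h1]
    have hm0 : (PySem.Int.mod 0 2 == 1) = false := by decide
    simp [pairsOf]
  | a :: b :: t, st => by
    have hlen : PySem.List.len (a :: b :: t) = ((2 + t.length : Nat) : Int) := by
      simp [PySem.List.len_eq]; omega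
    rw [hlen, PySem.List.pyRange_zero_natCast, List.range_add, List.map_append, List.foldl_append,
        List.map_map, List.foldl_map]
    simp only [Function.comp]
    have h2 : List.map (fun (k : Nat) => (k : Int)) (List.range 2) = [0, 1] := by decide
    rw [h2]
    simp only [List.foldl_cons, List.foldl_nil]
    have hm0 : (PySem.Int.mod 0 2 == 1) = false := by decide
    have hm1 : (PySem.Int.mod 1 2 == 1) = true := by decide
    rw [hm0]
    simp only [Bool.false_eq_true, if_false, hm1, if_true]
    have hga : PySem.List.pyGetD (a :: b :: t) (1 - 1) 0 = a := by
      norm_num [PySem.List.pyGetD_zero_cons]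
    have hgb : PySem.List.pyGetD (a :: b :: t) 1 0 = b := by
      rw [show (1 : Int) = ((1 : Nat) : Int) from rfl, PySem.List.pyGetD_natCast]; rfl
    rw [hga, hgb]
    have hrest : ∀ st', List.foldl
        (fun s (k : Nat) =>
          if PySem.Int.mod (((2 + k : Nat) : Int)) 2 == 1 then
            (PySem.List.pyRange (PySem.List.pyGetD (a :: b :: t) ((((2 + k : Nat) : Int))- 1) 0)
                (PySem.List.pyGetD (a :: b :: t) (((2 + k : Nat) : Int)) 0 + 1) 1).foldl
              (fun st2 j =>
                (PySem.List.pySetD st2.1 j (PySem.List.pyGetD i2 j 0),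
                 PySem.List.pySetD st2.2 j (PySem.List.pyGetD i1 j 0)))
              s
          else s) st' (List.range t.length)
        = (pairsOf t).foldl (segWrite i1 i2) st' := by
      intro st'
      rw [← outer_aux i1 i2 t st']
      rw [show PySem.List.len t = ((t.length : Nat) : Int) from by simp [PySem.List.len_eq],
          PySem.List.pyRange_zero_natCast, List.foldl_map]
      apply PySem.List.foldl_congr_mem
      intro acc k _
      have hmod : PySem.Int.mod (((2 + k : Nat) : Int)) 2 = PySem.Int.mod ((k : Nat) : Int) 2 := by
        rw [PySem.Int.mod_eq_emod_of_pos (by norm_num), PySem.Int.mod_eq_emod_of_pos (by norm_num)]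
        push_cast; omega
      rw [hmod]
      by_cases hodd : PySem.Int.mod ((k : Nat) : Int) 2 = 1
      · have hk1 : 1 ≤ k := by
          rw [PySem.Int.mod_eq_emod_of_pos (by norm_num)] at hodd; omega
        simp only [hodd, BEq.rfl, if_true]
        have e1 : (((2 + k : Nat) : Int)) - 1 = ((k + 1 : Nat) : Int) := by push_cast; ring
        have e2 : (((2 + k : Nat) : Int)) = ((k + 2 : Nat) : Int) := by push_cast; ring
        have e3 : ((k : Nat) : Int) - 1 = ((k - 1 : Nat) : Int) := by push_cast [hk1]; ring
        rw [e1, e2, e3, PySem.List.pyGetD_natCast, PySem.List.pyGetD_natCast,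
            PySem.List.pyGetD_natCast, PySem.List.pyGetD_natCast]
        have g1 : (a :: b :: t).getD (k + 1) 0 = t.getD (k - 1) 0 := by
          rw [show k + 1 = (k - 1) + 1 + 1 from by omega]
          simp
        have g2 : (a :: b :: t).getD (k + 2) 0 = t.getD k 0 := by
          simp
        rw [g1, g2]
      · have : (PySem.Int.mod ((k : Nat) : Int) 2 == 1) = false := by
          simpa using hodd
        rw [this]
        simp
    rw [hrest]
    rfl

lemma stage1 (vectorPuntos individuo1 individuo2 : List Int) :
    cruce vectorPuntos individuo1 individuo2 =
      (pairsOf vectorPuntos).foldl (segWrite individuo1 individuo2) (individuo1, individuo2) := by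
  rw [cruce]; exact outer_aux individuo1 individuo2 vectorPuntos (individuo1, individuo2)

-- the pair-state fold acts on the two components independently
lemma foldl_pair_split (i1 i2 : List Int) (l : List Int) : ∀ (st : List Int × List Int),
    l.foldl (fun st2 j =>
        (PySem.List.pySetD st2.1 j (PySem.List.pyGetD i2 j 0),
         PySem.List.pySetD st2.2 j (PySem.List.pyGetD i1 j 0))) st
      = (l.foldl (fun x j => PySem.List.pySetD x j (PySem.List.pyGetD i2 j 0)) st.1,
         l.foldl (fun x j => PySem.List.pySetD x j (PySem.List.pyGetD i1 j 0)) st.2) := by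
  induction l with
  | nil => intro st; rfl
  | cons j l ih => intro st; simp only [List.foldl_cons]; exact ih _

lemma segWrite_eq (i1 i2 : List Int) (st : List Int × List Int) (p : Int × Int) :
    segWrite i1 i2 st p = (wSeg i2 st.1 p.1 (p.2 + 1), wSeg i1 st.2 p.1 (p.2 + 1)) := by
  exact foldl_pair_split i1 i2 (PySem.List.pyRange p.1 (p.2 + 1) 1) st

lemma pairs_split (i1 i2 : List Int) : ∀ (P : List (Int × Int)) (st : List Int × List Int),
    P.foldl (segWrite i1 i2) st
      = (P.foldl (fun x p => wSeg i2 x p.1 (p.2 + 1)) st.1,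
         P.foldl (fun x p => wSeg i1 x p.1 (p.2 + 1)) st.2) := by
  intro P
  induction P with
  | nil => intro st; rfl
  | cons p P ih =>
    intro st
    simp only [List.foldl_cons, segWrite_eq]
    exact ih _

-- length preservation
lemma length_foldl_pySetD (f : Int → Int) (l : List Int) : ∀ (x : List Int),
    (l.foldl (fun x j => PySem.List.pySetD x j (f j)) x).length = x.length := by
  induction l with
  | nil => intro x; rfl
  | cons j l ih => intro x; simp only [List.foldl_cons]; rw [ih, PySem.List.length_pySetD]

lemma length_wSeg (src x : List Int) (lo hi : Int) : (wSeg src x lo hi).length = x.length :=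
  length_foldl_pySetD _ _ x

lemma length_pairs_fold (src : List Int) (P : List (Int × Int)) : ∀ (x : List Int),
    (P.foldl (fun x p => wSeg src x p.1 (p.2 + 1)) x).length = x.length := by
  induction P with
  | nil => intro x; rfl
  | cons p P ih => intro x; simp only [List.foldl_cons]; rw [ih, length_wSeg]

lemma getD_set' (xs : List Int) (m k : Nat) (v : Int) :
    (xs.set m v).getD k 0 = if m = k ∧ m < xs.length then v else xs.getD k 0 := by
  simp only [List.getD, List.getElem?_set]
  split_ifs <;> simp_all
  omega

-- STAGE 2 (single list): one segment write, pointwise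
lemma getD_wSeg (src : List Int) : ∀ (n : Nat) (lo hi : Int), (hi - lo).toNat = n →
    ∀ (x : List Int) (k : Nat), k < x.length → 0 ≤ lo →
    (wSeg src x lo hi).getD k 0
      = if lo ≤ (k : Int) ∧ (k : Int) < hi then src.getD k 0 else x.getD k 0 := by
  intro n
  induction n with
  | zero =>
    intro lo hi hn x k hk h0
    rw [wSeg, PySem.List.pyRange_one_eq_nil (by omega)]
    simp only [List.foldl_nil]
    rw [if_neg (by omega)]
  | succ n ih =>
    intro lo hi hn x k hk h0
    rw [wSeg, PySem.List.pyRange_one_cons (by omega : lo < hi)]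
    simp only [List.foldl_cons]
    rw [show (List.foldl (fun x j => PySem.List.pySetD x j (PySem.List.pyGetD src j 0))
        (PySem.List.pySetD x lo (PySem.List.pyGetD src lo 0)) (PySem.List.pyRange (lo + 1) hi 1))
        = wSeg src (PySem.List.pySetD x lo (PySem.List.pyGetD src lo 0)) (lo + 1) hi from rfl]
    rw [ih (lo + 1) hi (by omega) _ k (by rw [PySem.List.length_pySetD]; exact hk) (by omega)]
    rw [PySem.List.pySetD_of_nonneg x _ h0, getD_set']
    by_cases hcov : lo + 1 ≤ (k : Int) ∧ (k : Int) < hi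
    · rw [if_pos hcov, if_pos (by omega)]
    · rw [if_neg hcov]
      by_cases hk0 : lo = (k : Int) ∧ (k : Int) < hi
      · rw [if_pos ⟨by omega, by omega⟩, if_pos (by omega)]
        rw [show lo = ((k : Nat) : Int) from by omega, PySem.List.pyGetD_natCast]
      · rw [if_neg (by omega), if_neg (fun h => hk0 ⟨by omega, h.2⟩)]

-- STAGE 2 (pair list): fold of segment writes, pointwise
lemma getD_pairs_fold (src : List Int) : ∀ (P : List (Int × Int)) (x : List Int) (k : Nat),
    k < x.length → (∀ p ∈ P, p.1 ≤ p.2 → 0 ≤ p.1) →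
    (P.foldl (fun x p => wSeg src x p.1 (p.2 + 1)) x).getD k 0
      = if ∃ p ∈ P, p.1 ≤ (k : Int) ∧ (k : Int) ≤ p.2 then src.getD k 0 else x.getD k 0 := by
  intro P
  induction P with
  | nil => intro x k hk hP; simp
  | cons p P ih =>
    intro x k hk hP
    simp only [List.foldl_cons]
    rw [ih _ k (by rw [length_wSeg]; exact hk) (fun q hq => hP q (List.mem_cons_of_mem _ hq))]
    have hcond : (∃ q ∈ p :: P, q.1 ≤ (k : Int) ∧ (k : Int) ≤ q.2)
        ↔ ((p.1 ≤ (k : Int) ∧ (k : Int) ≤ p.2) ∨ ∃ q ∈ P, q.1 ≤ (k : Int) ∧ (k : Int) ≤ q.2) := by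
      simp [List.mem_cons, or_and_right, exists_or]
    by_cases hp : p.1 ≤ p.2
    · rw [getD_wSeg src _ p.1 (p.2 + 1) rfl x k hk (hP p (List.mem_cons_self) hp)]
      by_cases hP' : ∃ q ∈ P, q.1 ≤ (k : Int) ∧ (k : Int) ≤ q.2
      · rw [if_pos hP', if_pos (hcond.2 (Or.inr hP'))]
      · rw [if_neg hP']
        by_cases hpk : p.1 ≤ (k : Int) ∧ (k : Int) ≤ p.2
        · rw [if_pos (by omega), if_pos (hcond.2 (Or.inl hpk))]
        · rw [if_neg (by omega), if_neg (fun h => by rcases hcond.1 h with h | h <;> tauto)]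
    · rw [show wSeg src x p.1 (p.2 + 1) = x from by
        rw [wSeg, PySem.List.pyRange_one_eq_nil (by omega)]; rfl]
      by_cases hP' : ∃ q ∈ P, q.1 ≤ (k : Int) ∧ (k : Int) ≤ q.2
      · rw [if_pos hP', if_pos (hcond.2 (Or.inr hP'))]
      · rw [if_neg hP', if_neg (fun h => by
          rcases hcond.1 h with h | h
          · omega
          · tauto)]

-- B side: membership in the swap set
lemma mem_foldl_update (P : List (Int × Int)) : ∀ (s0 : PySem.Set Int) (j : Int),
    j ∈ P.foldl (fun s p => PySem.Set.update s (PySem.List.pyRange p.1 (p.2 + 1) 1)) s0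
      ↔ j ∈ s0 ∨ ∃ p ∈ P, p.1 ≤ j ∧ j ≤ p.2 := by
  induction P with
  | nil => intro s0 j; simp
  | cons p P ih =>
    intro s0 j
    simp only [List.foldl_cons]
    rw [ih]
    rw [PySem.Set.mem_update]
    rw [PySem.List.mem_pyRange_one]
    simp only [List.mem_cons]
    constructor
    · rintro (⟨h | h⟩ | h)
      · exact Or.inl h
      · exact Or.inr ⟨p, Or.inl rfl, by omega⟩
      · rcases h with ⟨q, hq, h⟩; exact Or.inr ⟨q, Or.inr hq, h⟩
    · rintro (h | ⟨q, hq | hq, h⟩)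
      · exact Or.inl (Or.inl h)
      · subst hq; exact Or.inl (Or.inr (by omega))
      · exact Or.inr ⟨q, hq, h⟩

lemma mem_swapSet (vectorPuntos : List Int) (j : Int) :
    j ∈ swapSet vectorPuntos ↔ ∃ p ∈ pairsOf vectorPuntos, p.1 ≤ j ∧ j ≤ p.2 := by
  rw [swapSet, mem_foldl_update]
  simp [PySem.Set.empty]

-- every consecutive pair is a pair of entries at indices (2k, 2k+1)
lemma mem_pairsOf : ∀ (vP : List Int) (p : Int × Int), p ∈ pairsOf vP →
    ∃ k : Nat, k < vP.length / 2 ∧ p.1 = vP.getD (2 * k) 0 ∧ p.2 = vP.getD (2 * k + 1) 0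
  | [], p, h => by simp [pairsOf] at h
  | [a], p, h => by simp [pairsOf] at h
  | a :: b :: t, p, h => by
    rw [pairsOf, List.mem_cons] at h
    rcases h with h | h
    · exact ⟨0, by simp [List.length_cons], by simp [h]⟩
    · obtain ⟨k, hk, h1, h2⟩ := mem_pairsOf t p h
      refine ⟨k + 1, by simp [List.length_cons]; omega, ?_, ?_⟩
      · rw [show 2 * (k + 1) = 2 * k + 1 + 1 from by ring]
        simpa using h1
      · rw [show 2 * (k + 1) + 1 = (2 * k + 1) + 1 + 1 from by ring]
        simpa using h2

-- one component of the final equality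
lemma component_eq (vP xs other : List Int)
    (hP : ∀ p ∈ pairsOf vP, p.1 ≤ p.2 → 0 ≤ p.1) :
    (pairsOf vP).foldl (fun x p => wSeg other x p.1 (p.2 + 1)) xs
      = (PySem.List.enumerate xs 0).map
          (fun q => if PySem.Set.contains (swapSet vP) q.1 then PySem.List.pyGetD other q.1 0 else q.2) := by
  apply List.ext_getElem
  · rw [length_pairs_fold, List.length_map, PySem.List.length_enumerate]
  · intro k h1 h2
    have hk : k < xs.length := by rwa [length_pairs_fold] at h1
    rw [List.getElem_map, PySem.List.getElem_enumerate]
    simp only [zero_add]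
    rw [← List.getD_eq_getElem _ 0 h1, getD_pairs_fold other (pairsOf vP) xs k hk hP]
    by_cases hcov : ∃ p ∈ pairsOf vP, p.1 ≤ (k : Int) ∧ (k : Int) ≤ p.2
    · rw [if_pos hcov,
          if_pos ((PySem.Set.contains_iff _ _).2 ((mem_swapSet vP (k : Int)).2 hcov)),
          PySem.List.pyGetD_natCast]
    · rw [if_neg hcov, if_neg (by
        intro h
        exact hcov ((mem_swapSet vP (k : Int)).1 ((PySem.Set.contains_iff _ _).1 h)))]
      exact List.getD_eq_getElem xs 0 hk

-- ===== VERDICT (by name: the statement is the Claim_ definition above) =====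
theorem cruce_spec : Claim_equal_cruce := by
  intro vP i1 i2 _hdom hpre
  unfold Spec_cruce
  have hP : ∀ p ∈ pairsOf vP, p.1 ≤ p.2 → 0 ≤ p.1 := by
    intro p hp h
    obtain ⟨k, hk, h1, h2⟩ := mem_pairsOf vP p hp
    rw [h1, h2] at h
    rw [h1]
    exact (hpre k (List.mem_range.2 hk) h).1
  rw [stage1, pairs_split, cruce_alt]
  exact Prod.ext (component_eq vP i1 i2 hP) (component_eq vP i2 i1 hP)
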